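-- pv_equiv track=rewrite | github.com/SingTheCode/algorithm | 일일알고리즘/2021 KAKAO BLIND RECRUITMENT/신규_아이디_추천.py | deleteDot
-- ===== SOURCE A (Python) =====
-- def deleteDot(id):
--     i = 0
--     while (i < len(id)):
--         if i == 0:
--             if id[i] == '.':
--                 id.pop(0)
--                 continue
--         if i == len(id) - 1:
--             if id[i] == '.':
--                 id.pop(i)
--                 continue
--
--         if id[i] == '.':
--             if i + 1 < len(id):
--                 if id[i + 1] == '.':
--                     id.pop(i + 1)
--                 else:
--                     i += 1
--         else:
--             i += 1
--     return id
-- ===== SOURCE B (Python) =====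
-- def deleteDot(id):
--     # Single linear pass; note: A mutates its argument in place, B does not (return value only).
--     res = []
--     for ch in id:
--         if ch == '.' and (not res or res[-1] == '.'):
--             continue
--         res.append(ch)
--     if res and res[-1] == '.':
--         res.pop()
--     return res
-- ===== Notes on version B (the rewrite author's own statement) =====
-- stated objective: faster
-- what changed: Replaced A's in-place while-loop that repeatedly pops elements by index (each pop shifts the tail) with a single left-to-right pass building a fresh result list, skipping leading/duplicate dots and dropping one trailing dot.
import Mathlib
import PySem

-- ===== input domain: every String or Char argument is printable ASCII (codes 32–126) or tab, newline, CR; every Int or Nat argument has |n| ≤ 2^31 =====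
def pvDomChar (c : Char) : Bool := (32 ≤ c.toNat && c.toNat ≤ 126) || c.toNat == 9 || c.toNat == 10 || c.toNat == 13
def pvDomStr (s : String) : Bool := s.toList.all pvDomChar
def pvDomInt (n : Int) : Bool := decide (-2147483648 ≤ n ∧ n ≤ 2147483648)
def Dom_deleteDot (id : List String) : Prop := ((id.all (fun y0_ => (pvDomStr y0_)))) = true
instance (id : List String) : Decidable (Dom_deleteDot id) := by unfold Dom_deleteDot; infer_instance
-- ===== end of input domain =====

-- B replaces A's in-place while-loop with index pops (quadratic in the worst case) by one
-- linear pass that skips leading/duplicate dots and drops a single trailing dot.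
-- Note: Python A mutates its argument in place; the equivalence proved here is about the return value.

-- ===== PORT A =====
-- The while loop of A, on state (i, xs); `id.pop(k)` (mutation only, result unused) is `List.eraseIdx k`.
def deleteDotLoop (i : Nat) (xs : List String) : List String :=
  if _h : i < xs.length then
    if i = 0 ∧ xs[0]? = some "." then
      deleteDotLoop 0 (xs.eraseIdx 0)               -- id.pop(0); continue
    else if i = xs.length - 1 ∧ xs[i]? = some "." then
      deleteDotLoop i (xs.eraseIdx i)               -- id.pop(i); continue
    else if xs[i]? = some "." then
      if i + 1 < xs.length then
        if xs[i + 1]? = some "." then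
          deleteDotLoop i (xs.eraseIdx (i + 1))     -- id.pop(i+1)
        else
          deleteDotLoop (i + 1) xs                  -- i += 1
      else
        xs  -- unreachable: branch 2 already handled i = len-1 (Python would loop forever here)
    else
      deleteDotLoop (i + 1) xs                      -- i += 1
  else
    xs
termination_by 2 * xs.length - i
decreasing_by all_goals first
  | (simp_all [List.length_eraseIdx]; omega)
  | simp_all

def deleteDot (id : List String) : List String := deleteDotLoop 0 id

-- ===== PORT B =====
-- one step of B's for-loop: skip a dot when the result is empty or already ends with a dot
def dotStep (res : List String) (ch : String) : List String :=
  if ch = "." ∧ (res = [] ∨ res.getLast? = some ".") then res else res ++ [ch]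

def deleteDot_alt (id : List String) : List String :=
  let res := id.foldl dotStep []
  if res ≠ [] ∧ res.getLast? = some "." then res.dropLast else res

-- ===== PRECONDITION & SPEC =====
def Spec_deleteDot (id : List String) (out : List String) : Prop := out = deleteDot_alt id
instance (id : List String) (out : List String) : Decidable (Spec_deleteDot id out) := by unfold Spec_deleteDot; infer_instance

-- ===== CLAIM (what is proved, stated in full; the proofs are below) =====
def Claim_equal_deleteDot : Prop := ∀ (id : List String), Dom_deleteDot id → Spec_deleteDot id (deleteDot id)

-- ===== LEMMAS AND PROOFS =====

-- B's final trailing-dot removal, as a function (proof helper)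
def dotFinal (res : List String) : List String :=
  if res ≠ [] ∧ res.getLast? = some "." then res.dropLast else res

lemma eraseIdx_append_len {α : Type} (P r : List α) (c : α) :
    (P ++ c :: r).eraseIdx P.length = P ++ r := by
  induction P with
  | nil => simp [List.eraseIdx]
  | cons a P ih => simpa using ih

-- loop invariant: the finished prefix P ends with "." only if the next unprocessed
-- element exists and is not "."
def InvDD (P rest : List String) : Prop :=
  P.getLast? = some "." → rest ≠ [] ∧ rest.head? ≠ some "."

-- key lemma: A's loop at position |P| on P ++ rest computes B's fold continued over rest,
-- followed by B's final trailing-dot removal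
lemma loopA_eq_fold : ∀ n P rest, P.length + 2 * rest.length ≤ n → InvDD P rest →
    deleteDotLoop P.length (P ++ rest) = dotFinal (rest.foldl dotStep P) := by
  intro n
  induction n with
  | zero =>
    intro P rest hn hinv
    have hP : P = [] := by cases P <;> simp_all
    have hr : rest = [] := by cases rest <;> simp_all
    subst hP; subst hr
    rw [deleteDotLoop]
    simp [dotFinal]
  | succ n ih =>
    intro P rest hn hinv
    cases rest with
    | nil =>
      -- loop exits; Inv says P does not end with "."
      rw [deleteDotLoop]
      have hlast : P.getLast? ≠ some "." := fun h => (hinv h).1 rfl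
      simp [dotFinal, hlast]
    | cons c r =>
      rw [deleteDotLoop]
      have hlen : P.length < (P ++ c :: r).length := by simp
      have hget : (P ++ c :: r)[P.length]? = some c := by
        simp
      by_cases hc : c = "."
      · subst hc
        have hPlast : P.getLast? ≠ some "." := fun h => (hinv h).2 (by simp)
        by_cases hP : P = []
        · -- leading dot: pop(0)
          subst hP
          have : ([] : List String) ++ "." :: r = "." :: r := rfl
          simp only [this, List.length_nil]
          have hrec : deleteDotLoop 0 (("." :: r).eraseIdx 0) =
              dotFinal (r.foldl dotStep []) := by
            have := ih [] r (by simp at hn ⊢; omega) (by simp [InvDD])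
            simpa using this
          simp only [List.eraseIdx] at hrec
          simp [hrec, dotStep]
        · cases r with
          | nil =>
            -- trailing dot at the last position: pop(i), loop exits with P
            have hne0 : P.length ≠ 0 := by simpa using fun h => hP (List.length_eq_zero_iff.mp h)
            have hidx : P.length = (P ++ ["."]).length - 1 := by simp
            rw [dif_pos hlen, if_neg (by simp [hne0]), if_pos ⟨hidx, by simp⟩]
            have herase : (P ++ ["."]).eraseIdx P.length = P := by
              simpa using eraseIdx_append_len P [] "."
            rw [herase, deleteDotLoop]
            simp [dotFinal, dotStep, hP, hPlast]
          | cons d r2 =>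
            have hne0 : P.length ≠ 0 := by simpa using fun h => hP (List.length_eq_zero_iff.mp h)
            have hnotlast : P.length ≠ (P ++ "." :: d :: r2).length - 1 := by simp
            rw [dif_pos hlen, if_neg (by simp [hne0]), if_neg (by tauto), if_pos hget,
              if_pos (by simp)]
            have hget2 : (P ++ "." :: d :: r2)[P.length + 1]? = some d := by
              rw [List.getElem?_append_right (by simp)]
              simp
            rw [hget2]
            have hstep : dotStep P "." = P ++ ["."] := by simp [dotStep, hP, hPlast]
            by_cases hd : d = "."
            · -- next is also a dot: pop(i+1)
              subst hd
              rw [if_pos rfl]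
              have herase : (P ++ "." :: "." :: r2).eraseIdx (P.length + 1) = P ++ "." :: r2 := by
                have : P.length + 1 = (P ++ ["."]).length := by simp
                rw [this]
                simpa using eraseIdx_append_len (P ++ ["."]) r2 "."
              rw [herase]
              have hrec := ih P ("." :: r2) (by simp at hn ⊢; omega)
                (fun h => absurd h hPlast)
              rw [hrec]
              simp [List.foldl, dotStep, hP, hPlast]
            · -- dot followed by a non-dot: i += 1
              rw [if_neg (by simp [hd])]
              have hrec := ih (P ++ ["."]) (d :: r2) (by simp at hn ⊢; omega)
                (by intro _; exact ⟨by simp, by simp [hd]⟩)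
              have hlen1 : P.length + 1 = (P ++ ["."]).length := by simp
              rw [hlen1, show P ++ "." :: d :: r2 = (P ++ ["."]) ++ d :: r2 by simp, hrec]
              simp [List.foldl, hstep]
      · -- a non-dot element: i += 1 in every branch
        rw [dif_pos hlen,
          if_neg (by rintro ⟨h0, hx⟩
                     have hPnil : P = [] := List.length_eq_zero_iff.mp h0
                     subst hPnil; simp at hx; exact hc hx),
          if_neg (by rintro ⟨-, hx⟩; rw [hget] at hx; simp at hx; exact hc hx),
          if_neg (by rw [hget]; simp [hc])]
        have hstep : dotStep P c = P ++ [c] := by simp [dotStep, hc]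
        have hrec := ih (P ++ [c]) r (by simp at hn ⊢; omega)
          (by intro h; simp [hc] at h)
        have hlen1 : P.length + 1 = (P ++ [c]).length := by simp
        rw [hlen1, show P ++ c :: r = (P ++ [c]) ++ r by simp, hrec]
        simp [List.foldl, hstep]

-- ===== VERDICT (by name: the statement is the Claim_ definition above) =====
theorem deleteDot_spec : Claim_equal_deleteDot := by
  intro id _
  unfold Spec_deleteDot deleteDot deleteDot_alt
  have := loopA_eq_fold (id.length + 2 * id.length) [] id (by simp) (by simp [InvDD])
  simpa [dotFinal] using this
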